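-- pv_equiv track=rewrite | github.com/samyak1409/DSA | Contests/23) Biweekly Contest 98/2) Minimum Score by Changing Two Elements.py | minimize_sum
-- ===== SOURCE A (Python) =====
-- def minimize_sum(nums: list[int]) -> int:
--     """"""
--
--     # 1) Sub-Optimal (Greedy: Sort, Choose from min and max): TC = O(n*log(n)); SC = O(n))
--     # ALL HAND-WRITTEN EXPLANATION:
--     # This is a good problem! (It'll look medium but is easy.)
--     # So, first of all we realize that we may sort the array and the answer will remain the same.
--     # (Why?
--     # https://leetcode.com/problems/minimum-score-by-changing-two-elements/solutions/3202016/java-c-python-change-biggest-or-smallest/comments/1806119)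
--     # Now, the first thing that come in mind is this is a min-max problem, and we should apply Binary Search, but no, no
--     # need, we can be greedy and don't need to check all possible pairs!
--     # Simplifying the problem statement:
--     # We just need to find the minimum(diff b/w the closest pair (by value) + diff b/w the farthest pair (by value)) by
--     # changing at most 2 values!
--     # So, let's try sorting the array and see what can we do:
--     # 1 4 5 7 8
--     # Realization: The farthest pair will always be = (nums[0], nums[n-1])
--     # and the Closest pair will be any (nums[i], nums[i+1])
--     # We have to minimize both.
--     # If we change even a one num equal to it's neighbour, then we'll get the diff b/w the closest pair = 0.
--     # Diff b/w the farthest pair (be x) is bounded by the min and max num.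
--     # If we change the nums[0] = nums[1], then x = nums[-1] - nums[1]
--     # And for sure we'll get a better (possibly same) minimized answer as nums[1] >= nums[0] as the arr is sorted.
--     # Wait, we can change two nums, so even better x = nums[-1] - nums[2]
--     # And in the process, we can change nums[0], nums[1] to nums[2], by this, we'll get y = 0 as well!
--     # So, finally, turns out we just need to return the diff b/w nums[-1] and nums[2].
--     # *Penalized in the contest* Bro, it can be the other way around too!!!!
--     # So return min(nums[-1]-nums[2], nums[-3]-nums[0])
--     # *Penalized again* Bro, what about skipping both from left and right!!!!
--     # Ans: return min(nums[-1]-nums[2], nums[-3]-nums[0], nums[-2]-nums[1])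
--
--     """
--     nums = sorted(nums)  # (doesn't modify the input arr)
--     return min(nums[-1]-nums[2], nums[-3]-nums[0], nums[-2]-nums[1])
--     """
--
--     # 1.1) Same idea, but can be the implemented without Sorting the whole arr, as we only want the 3 smallest & 3
--     # largest nums: TC = O(n); SC = O(1)
--     # https://leetcode.com/problems/minimum-score-by-changing-two-elements/solutions/3201904/explained-two-solutions-with-without-sorting-very-simple-easy-to-understand
--
--     # Finding smallest 3 & largest 3 in linear time:
--     s1 = s2 = s3 = float('inf')  # nums[0], nums[1], nums[2] (sorted nums)
--     l1 = l2 = l3 = float('-inf')  # nums[-1], nums[-2], nums[-3] (sorted nums)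
--     # (s1, s2, s3, ..., l3, l2, l1)
--     for n in nums:
--         # Smallest:
--         if s1 > n:
--             s3, s2, s1 = s2, s1, n
--         elif s2 > n:
--             s3, s2 = s2, n
--         elif s3 > n:
--             s3 = n
--         # Largest:
--         if l1 < n:
--             l3, l2, l1 = l2, l1, n
--         elif l2 < n:
--             l3, l2 = l2, n
--         elif l3 < n:
--             l3 = n
--
--     # Main:
--     return min(l1-s3, l3-s1, l2-s2)
-- ===== SOURCE B (Python) =====
-- def minimize_sum(nums: list[int]) -> int:
--     s = sorted(nums)
--     return min(s[-1] - s[2], s[-3] - s[0], s[-2] - s[1])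
-- ===== Notes on version B (the rewrite author's own statement) =====
-- stated objective: simpler
-- what changed: Replaces the six-variable single-pass min/max selection (with float inf sentinels) by a full sort followed by direct index arithmetic on the three smallest and three largest positions.
-- outside the precondition, e.g. on minimize_sum([1, 2]): A returns -inf, B raises IndexError
import Mathlib
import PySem

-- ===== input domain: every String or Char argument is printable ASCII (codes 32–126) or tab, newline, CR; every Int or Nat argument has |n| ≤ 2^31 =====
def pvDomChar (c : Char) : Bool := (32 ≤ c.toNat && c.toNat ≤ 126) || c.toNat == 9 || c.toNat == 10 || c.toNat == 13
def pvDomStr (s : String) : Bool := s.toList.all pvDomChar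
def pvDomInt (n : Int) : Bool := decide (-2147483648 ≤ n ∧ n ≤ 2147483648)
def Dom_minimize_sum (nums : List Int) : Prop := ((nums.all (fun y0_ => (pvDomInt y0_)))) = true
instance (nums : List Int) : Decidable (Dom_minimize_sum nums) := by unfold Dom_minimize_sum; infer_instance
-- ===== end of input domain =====

-- B replaces A's six-variable single-pass min/max selection by a full sort plus index
-- arithmetic on the three smallest / three largest positions (objective: simpler).


-- ===== PORT A =====
-- A's sentinels float('inf') / float('-inf') are modelled as `none` (no real value yet);
-- `some v` is an ordinary number. The comparisons `s > n` / `l < n` are true whenever the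
-- slot still holds its infinite sentinel, exactly as in Python.
def pvGtInf : Option Int → Int → Bool
  | none, _ => true        -- inf > n
  | some s, n => decide (n < s)

def pvLtNegInf : Option Int → Int → Bool
  | none, _ => true        -- -inf < n
  | some l, n => decide (l < n)

-- Smallest: the first if/elif/elif chain of the loop body ((s1, s2, s3) is the state)
def pvSmallStep (s : Option Int × Option Int × Option Int) (n : Int) :
    Option Int × Option Int × Option Int :=
  if pvGtInf s.1 n then (some n, s.1, s.2.1)        -- s3, s2, s1 = s2, s1, n
  else if pvGtInf s.2.1 n then (s.1, some n, s.2.1) -- s3, s2 = s2, n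
  else if pvGtInf s.2.2 n then (s.1, s.2.1, some n) -- s3 = n
  else s

-- Largest: the second if/elif/elif chain of the loop body ((l1, l2, l3) is the state)
def pvLargeStep (l : Option Int × Option Int × Option Int) (n : Int) :
    Option Int × Option Int × Option Int :=
  if pvLtNegInf l.1 n then (some n, l.1, l.2.1)
  else if pvLtNegInf l.2.1 n then (l.1, some n, l.2.1)
  else if pvLtNegInf l.2.2 n then (l.1, l.2.1, some n)
  else l

def pvStepA (st : (Option Int × Option Int × Option Int) × (Option Int × Option Int × Option Int))
    (n : Int) : (Option Int × Option Int × Option Int) × (Option Int × Option Int × Option Int) :=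
  (pvSmallStep st.1 n, pvLargeStep st.2 n)

-- Pre_ guarantees every slot is `some`; outside Pre_ the Python value is a float
-- (±inf / nan), not an int, so the `getD 0` defaults are never claimed about.
def minimize_sum (nums : List Int) : Int :=
  let st := nums.foldl pvStepA ((none, none, none), (none, none, none))
  min (min (st.2.1.getD 0 - st.1.2.2.getD 0) (st.2.2.2.getD 0 - st.1.1.getD 0))
    (st.2.2.1.getD 0 - st.1.2.1.getD 0)

-- ===== PORT B =====
-- s = sorted(nums); min(s[-1]-s[2], s[-3]-s[0], s[-2]-s[1]). Under Pre_ (length ≥ 3)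
-- every pyGet? is `some`; the getD 0 default is never reached there.
def minimize_sum_alt (nums : List Int) : Int :=
  let s := PySem.List.sorted nums (fun x => x) false
  min (min ((PySem.List.pyGet? s (-1)).getD 0 - (PySem.List.pyGet? s 2).getD 0)
           ((PySem.List.pyGet? s (-3)).getD 0 - (PySem.List.pyGet? s 0).getD 0))
      ((PySem.List.pyGet? s (-2)).getD 0 - (PySem.List.pyGet? s 1).getD 0)

-- ===== PRECONDITION & SPEC =====
-- Pre_ excludes lists of fewer than 3 elements: there A returns a float (±inf), not a
-- value of the declared int type, and B raises IndexError.
def Pre_minimize_sum (nums : List Int) : Prop := 3 ≤ nums.length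
instance (nums : List Int) : Decidable (Pre_minimize_sum nums) := by
  unfold Pre_minimize_sum; infer_instance
def pvWitness_minimize_sum : List Int := [1, 4, 5, 7, 8]

def Spec_minimize_sum (nums : List Int) (out : Int) : Prop := out = minimize_sum_alt nums
instance (nums : List Int) (out : Int) : Decidable (Spec_minimize_sum nums out) := by unfold Spec_minimize_sum; infer_instance

-- ===== CLAIM (what is proved, stated in full; the proofs are below) =====
def Claim_equal_minimize_sum : Prop := ∀ (nums : List Int), Dom_minimize_sum nums → Pre_minimize_sum nums → Spec_minimize_sum nums (minimize_sum nums)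

-- ===== LEMMAS AND PROOFS =====

-- the first three entries of a list, `none` where the list has run out (= A's inf slots)
def pvPad3 (l : List Int) : Option Int × Option Int × Option Int := (l[0]?, l[1]?, l[2]?)

-- insertion into an ascending list, after equal elements (A's strict `>` tests)
def pvInsA (n : Int) : List Int → List Int
  | [] => [n]
  | a :: t => if n < a then n :: a :: t else a :: pvInsA n t

-- insertion into a descending list, after equal elements (A's strict `<` tests)
def pvInsD (n : Int) : List Int → List Int
  | [] => [n]
  | a :: t => if a < n then n :: a :: t else a :: pvInsD n t

lemma pvInsA_perm (n : Int) (l : List Int) : (pvInsA n l).Perm (n :: l) := by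
  induction l with
  | nil => simp [pvInsA]
  | cons a t ih =>
    simp only [pvInsA]
    split_ifs with h
    · exact List.Perm.refl _
    · exact (List.Perm.cons a ih).trans (List.Perm.swap n a t)

lemma pvInsD_perm (n : Int) (l : List Int) : (pvInsD n l).Perm (n :: l) := by
  induction l with
  | nil => simp [pvInsD]
  | cons a t ih =>
    simp only [pvInsD]
    split_ifs with h
    · exact List.Perm.refl _
    · exact (List.Perm.cons a ih).trans (List.Perm.swap n a t)

lemma pvInsA_pairwise (n : Int) (l : List Int) (h : l.Pairwise (· ≤ ·)) :
    (pvInsA n l).Pairwise (· ≤ ·) := by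
  induction l with
  | nil => simp [pvInsA]
  | cons a t ih =>
    rcases List.pairwise_cons.mp h with ⟨ha, ht⟩
    simp only [pvInsA]
    split_ifs with hlt
    · refine List.pairwise_cons.mpr ⟨?_, h⟩
      intro x hx
      rcases List.mem_cons.mp hx with hx | hx
      · omega
      · exact le_of_lt (lt_of_lt_of_le hlt (ha x hx))
    · refine List.pairwise_cons.mpr ⟨?_, ih ht⟩
      intro x hx
      rcases List.mem_cons.mp ((List.Perm.mem_iff (pvInsA_perm n t)).mp hx) with hx | hx
      · omega
      · exact ha x hx

lemma pvInsD_pairwise (n : Int) (l : List Int) (h : l.Pairwise (fun a b => b ≤ a)) :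
    (pvInsD n l).Pairwise (fun a b => b ≤ a) := by
  induction l with
  | nil => simp [pvInsD]
  | cons a t ih =>
    rcases List.pairwise_cons.mp h with ⟨ha, ht⟩
    simp only [pvInsD]
    split_ifs with hlt
    · refine List.pairwise_cons.mpr ⟨?_, h⟩
      intro x hx
      rcases List.mem_cons.mp hx with hx | hx
      · omega
      · exact le_of_lt (lt_of_le_of_lt (ha x hx) hlt)
    · refine List.pairwise_cons.mpr ⟨?_, ih ht⟩
      intro x hx
      rcases List.mem_cons.mp ((List.Perm.mem_iff (pvInsD_perm n t)).mp hx) with hx | hx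
      · omega
      · exact ha x hx

-- appending one element to the input inserts it into the sorted output
lemma pvSorted_append (xs : List Int) (n : Int) :
    PySem.List.sorted (xs ++ [n]) (fun x => x) false
      = pvInsA n (PySem.List.sorted xs (fun x => x) false) := by
  apply PySem.List.sorted_id_eq_of_perm_of_pairwise
  · exact ((pvInsA_perm n _).trans
      ((PySem.List.sorted_perm xs (fun x => x) false).cons n)).trans
      (List.perm_append_singleton n xs).symm
  · exact pvInsA_pairwise n _ (by simpa using PySem.List.sorted_pairwise xs (fun x => x))

-- reversing turns ascending insertion into descending insertion
lemma pvInsA_reverse (n : Int) (l : List Int) (h : l.Pairwise (· ≤ ·)) :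
    (pvInsA n l).reverse = pvInsD n l.reverse := by
  refine List.Perm.eq_of_pairwise (le := fun a b => b ≤ a)
    (fun a b _ _ h1 h2 => le_antisymm h2 h1) ?_ ?_ ?_
  · exact (List.pairwise_reverse).mpr (by simpa using pvInsA_pairwise n l h)
  · exact pvInsD_pairwise n l.reverse ((List.pairwise_reverse).mpr (by simpa using h))
  · exact ((List.reverse_perm _).trans (pvInsA_perm n l)).trans
      (((l.reverse_perm).symm.cons n).trans (pvInsD_perm n l.reverse).symm)

-- A's smallest-three chain on a padded state is ascending insertion
lemma pvSmallStep_pad3 (n : Int) (l : List Int) :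
    pvSmallStep (pvPad3 l) n = pvPad3 (pvInsA n l) := by
  rcases l with _ | ⟨a, _ | ⟨b, _ | ⟨c, t⟩⟩⟩ <;>
    simp only [pvSmallStep, pvPad3, pvGtInf, pvInsA] <;>
    split_ifs <;> simp_all

-- A's largest-three chain on a padded state is descending insertion
lemma pvLargeStep_pad3 (n : Int) (m : List Int) :
    pvLargeStep (pvPad3 m) n = pvPad3 (pvInsD n m) := by
  rcases m with _ | ⟨x, _ | ⟨y, _ | ⟨z, u⟩⟩⟩ <;>
    simp only [pvLargeStep, pvPad3, pvLtNegInf, pvInsD] <;>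
    split_ifs <;> simp_all

-- one fold step on padded states is insertion on both underlying lists
lemma pvStepA_pad3 (n : Int) (l m : List Int) :
    pvStepA (pvPad3 l, pvPad3 m) n = (pvPad3 (pvInsA n l), pvPad3 (pvInsD n m)) := by
  simp only [pvStepA]
  rw [pvSmallStep_pad3, pvLargeStep_pad3]

-- main loop invariant: the fold state is the padded head of the sorted list and of its reverse
lemma pvFold_inv (xs : List Int) :
    xs.foldl pvStepA ((none, none, none), (none, none, none))
      = (pvPad3 (PySem.List.sorted xs (fun x => x) false),
         pvPad3 (PySem.List.sorted xs (fun x => x) false).reverse) := by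
  induction xs using List.reverseRecOn with
  | nil => simp [PySem.List.sorted, pvPad3]
  | append_singleton xs n ih =>
    have hpw : (PySem.List.sorted xs (fun x => x) false).Pairwise (· ≤ ·) := by
      simpa using PySem.List.sorted_pairwise xs (fun x => x)
    rw [List.foldl_append, List.foldl_cons, List.foldl_nil, ih, pvSorted_append,
        pvInsA_reverse n _ hpw, pvStepA_pad3]

-- ===== VERDICT (by name: the statement is the Claim_ definition above) =====
theorem minimize_sum_spec : Claim_equal_minimize_sum := by
  intro nums _ hpre
  unfold Spec_minimize_sum minimize_sum minimize_sum_alt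
  set s := PySem.List.sorted nums (fun x => x) false with hs
  have hlen : 3 ≤ s.length := by
    rw [hs, PySem.List.length_sorted]; exact hpre
  rw [pvFold_inv nums, ← hs]
  simp only [pvPad3]
  have e1 : s.length - 1 - 0 = s.length - 1 := by omega
  have e2 : s.length - 1 - 1 = s.length - 2 := by omega
  have e3 : s.length - 1 - 2 = s.length - 3 := by omega
  have h0 : s.reverse[0]? = s[s.length - 1]? := by
    rw [List.getElem?_reverse (by omega), e1]
  have h1 : s.reverse[1]? = s[s.length - 2]? := by
    rw [List.getElem?_reverse (by omega), e2]
  have h2 : s.reverse[2]? = s[s.length - 3]? := by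
    rw [List.getElem?_reverse (by omega), e3]
  rw [PySem.List.pyGet?_neg_ofNat s 1 (by omega) (by omega),
      PySem.List.pyGet?_neg_ofNat s 2 (by omega) (by omega),
      PySem.List.pyGet?_neg_ofNat s 3 (by omega) (by omega)]
  have g0 : PySem.List.pyGet? s 0 = s[0]? := by
    rw [show (0 : Int) = ((0 : Nat) : Int) by norm_num,
        PySem.List.pyGet?_ofNat s 0 (by omega)]
    simp [List.getElem?_eq_getElem (by omega : 0 < s.length)]
  have g1 : PySem.List.pyGet? s 1 = s[1]? := by
    rw [show (1 : Int) = ((1 : Nat) : Int) by norm_num,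
        PySem.List.pyGet?_ofNat s 1 (by omega)]
    simp [List.getElem?_eq_getElem (by omega : 1 < s.length)]
  have g2 : PySem.List.pyGet? s 2 = s[2]? := by
    rw [show (2 : Int) = ((2 : Nat) : Int) by norm_num,
        PySem.List.pyGet?_ofNat s 2 (by omega)]
    simp [List.getElem?_eq_getElem (by omega : 2 < s.length)]
  rw [g0, g1, g2, h0, h1, h2]
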